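-- pv_equiv track=rewrite | github.com/AsukaFurukawa/BigData-Sentiment-Analysis | sentiment-analysis/tech_sentiment.py | identify_tech_categories
-- ===== SOURCE A (Python) =====
-- def identify_tech_categories(entities):
--     """Categorize tech entities into broader categories"""
--     categories = {
--         "AI/ML": ["ai", "artificial intelligence", "machine learning", "ml", "nlp", "deep learning"],
--         "Cloud": ["cloud", "aws", "azure", "gcp", "google cloud", "server"],
--         "Blockchain": ["blockchain", "crypto", "bitcoin", "ethereum", "nft", "token", "defi", "web3"],
--         "Mobile": ["app", "mobile", "ios", "android"],
--         "Software": ["software", "code", "programming", "developer", "api", "sdk", "framework", "library"],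
--         "Hardware": ["hardware", "gpu", "cpu", "processor"],
--         "Data": ["data", "database", "sql", "nosql", "analytics", "big data", "hadoop", "spark"],
--         "Internet": ["network", "internet", "wifi", "5g"],
--         "Security": ["cybersecurity", "encryption", "firewall", "security"],
--         "Emerging": ["iot", "vr", "ar", "virtual reality", "augmented reality", "metaverse", "robotics"]
--     }
--
--     result = {}
--     for category, terms in categories.items():
--         matches = [entity for entity in entities if entity in terms]
--         if matches:
--             result[category] = matches
--
--     return result
-- ===== SOURCE B (Python) =====
-- # term table kept as one CSV string per category; one pass over entities into pre-allocated buckets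
-- _CATS = [
--     ("AI/ML", "ai,artificial intelligence,machine learning,ml,nlp,deep learning"),
--     ("Cloud", "cloud,aws,azure,gcp,google cloud,server"),
--     ("Blockchain", "blockchain,crypto,bitcoin,ethereum,nft,token,defi,web3"),
--     ("Mobile", "app,mobile,ios,android"),
--     ("Software", "software,code,programming,developer,api,sdk,framework,library"),
--     ("Hardware", "hardware,gpu,cpu,processor"),
--     ("Data", "data,database,sql,nosql,analytics,big data,hadoop,spark"),
--     ("Internet", "network,internet,wifi,5g"),
--     ("Security", "cybersecurity,encryption,firewall,security"),
--     ("Emerging", "iot,vr,ar,virtual reality,augmented reality,metaverse,robotics"),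
-- ]
--
--
-- def identify_tech_categories(entities):
--     """Categorize tech entities into broader categories"""
--     lookup = {}
--     for name, csv in _CATS:
--         for term in csv.split(","):
--             lookup[term] = name
--
--     buckets = {name: [] for name, _ in _CATS}
--     for e in entities:
--         c = lookup.get(e)
--         if c is not None:
--             buckets[c].append(e)
--
--     return {name: b for name, b in buckets.items() if b}
-- ===== Notes on version B (the rewrite author's own statement) =====
-- stated objective: faster
-- what changed: Instead of scanning the whole entity list once per category with a linear per-category membership test, B builds a flat term-to-category lookup dict from a CSV term table, makes a single pass over the entities appending each hit to a pre-allocated per-category bucket, and emits the non-empty buckets in the fixed table order.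
import Mathlib
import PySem

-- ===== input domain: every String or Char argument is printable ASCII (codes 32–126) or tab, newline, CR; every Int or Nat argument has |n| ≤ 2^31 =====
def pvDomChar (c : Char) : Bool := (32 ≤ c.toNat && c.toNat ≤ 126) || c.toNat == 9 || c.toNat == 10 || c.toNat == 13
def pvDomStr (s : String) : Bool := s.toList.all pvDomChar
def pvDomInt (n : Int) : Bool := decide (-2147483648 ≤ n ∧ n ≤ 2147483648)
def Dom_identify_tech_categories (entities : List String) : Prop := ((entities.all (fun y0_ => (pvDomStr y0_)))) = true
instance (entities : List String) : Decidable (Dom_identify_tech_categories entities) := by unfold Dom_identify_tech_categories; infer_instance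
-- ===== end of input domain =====

-- B replaces A's per-category scans of the entity list by one pass over the entities through a
-- flat term→category lookup built from a per-category CSV term table, filling pre-allocated
-- per-category buckets and emitting the non-empty ones in table order (measured faster in a timing run).


-- ===== PORT A =====
-- A's literal categories table
def pvCategories : List (String × List String) := [
  ("AI/ML", ["ai", "artificial intelligence", "machine learning", "ml", "nlp", "deep learning"]),
  ("Cloud", ["cloud", "aws", "azure", "gcp", "google cloud", "server"]),
  ("Blockchain", ["blockchain", "crypto", "bitcoin", "ethereum", "nft", "token", "defi", "web3"]),
  ("Mobile", ["app", "mobile", "ios", "android"]),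
  ("Software", ["software", "code", "programming", "developer", "api", "sdk", "framework", "library"]),
  ("Hardware", ["hardware", "gpu", "cpu", "processor"]),
  ("Data", ["data", "database", "sql", "nosql", "analytics", "big data", "hadoop", "spark"]),
  ("Internet", ["network", "internet", "wifi", "5g"]),
  ("Security", ["cybersecurity", "encryption", "firewall", "security"]),
  ("Emerging", ["iot", "vr", "ar", "virtual reality", "augmented reality", "metaverse", "robotics"])]

def identify_tech_categories (entities : List String) : List (String × List String) :=
  (pvCategories.foldl (fun result p =>
      let ms := entities.filter (fun entity => p.2.contains entity)
      if ms ≠ [] then result.insert p.1 ms else result)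
    PySem.Dict.empty).items

-- ===== PORT B =====
-- B's term table: one CSV string of terms per category
def pvCatData : List (String × String) := [
  ("AI/ML", "ai,artificial intelligence,machine learning,ml,nlp,deep learning"),
  ("Cloud", "cloud,aws,azure,gcp,google cloud,server"),
  ("Blockchain", "blockchain,crypto,bitcoin,ethereum,nft,token,defi,web3"),
  ("Mobile", "app,mobile,ios,android"),
  ("Software", "software,code,programming,developer,api,sdk,framework,library"),
  ("Hardware", "hardware,gpu,cpu,processor"),
  ("Data", "data,database,sql,nosql,analytics,big data,hadoop,spark"),
  ("Internet", "network,internet,wifi,5g"),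
  ("Security", "cybersecurity,encryption,firewall,security"),
  ("Emerging", "iot,vr,ar,virtual reality,augmented reality,metaverse,robotics")]

-- lookup = {}; for name, csv in _CATS: for term in csv.split(","): lookup[term] = name
-- (csv.split(",") with the nonempty literal separator never raises: split? is 'some' here)
def pvLookup : PySem.Dict String String :=
  pvCatData.foldl (fun d p =>
      ((PySem.Str.split? p.2 ",").getD []).foldl (fun d term => d.insert term p.1) d)
    PySem.Dict.empty

def identify_tech_categories_alt (entities : List String) : List (String × List String) :=
  -- buckets = {name: [] for name, _ in _CATS}
  let buckets0 : PySem.Dict String (List String) :=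
    pvCatData.foldl (fun d p => d.insert p.1 []) PySem.Dict.empty
  -- for e in entities: c = lookup.get(e); if c is not None: buckets[c].append(e)
  let buckets := entities.foldl (fun d e =>
      match pvLookup.get? e with
      | some c => d.modify c [] (· ++ [e])
      | none => d) buckets0
  -- {name: b for name, b in buckets.items() if b}
  (buckets.items.foldl (fun r q => if q.2 ≠ [] then r.insert q.1 q.2 else r)
    PySem.Dict.empty).items

-- ===== PRECONDITION & SPEC =====
def Spec_identify_tech_categories (entities : List String) (out : List (String × List String)) : Prop := out = identify_tech_categories_alt entities
instance (entities : List String) (out : List (String × List String)) : Decidable (Spec_identify_tech_categories entities out) := by unfold Spec_identify_tech_categories; infer_instance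

-- ===== CLAIM (what is proved, stated in full; the proofs are below) =====
def Claim_equal_identify_tech_categories : Prop := ∀ (entities : List String), Dom_identify_tech_categories entities → Spec_identify_tech_categories entities (identify_tech_categories entities)

-- ===== LEMMAS AND PROOFS =====

-- pvLookup evaluated to its literal association list
set_option maxRecDepth 40000 in
theorem pvLookup_eq : pvLookup = PySem.Dict.mk [("ai", "AI/ML"), ("artificial intelligence", "AI/ML"), ("machine learning", "AI/ML"), ("ml", "AI/ML"), ("nlp", "AI/ML"), ("deep learning", "AI/ML"), ("cloud", "Cloud"), ("aws", "Cloud"), ("azure", "Cloud"), ("gcp", "Cloud"), ("google cloud", "Cloud"), ("server", "Cloud"), ("blockchain", "Blockchain"), ("crypto", "Blockchain"), ("bitcoin", "Blockchain"), ("ethereum", "Blockchain"), ("nft", "Blockchain"), ("token", "Blockchain"), ("defi", "Blockchain"), ("web3", "Blockchain"), ("app", "Mobile"), ("mobile", "Mobile"), ("ios", "Mobile"), ("android", "Mobile"), ("software", "Software"), ("code", "Software"), ("programming", "Software"), ("developer", "Software"), ("api", "Software"), ("sdk", "Software"), ("framework", "Software"), ("library", "Software"), ("hardware", "Hardware"),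 ("gpu", "Hardware"), ("cpu", "Hardware"), ("processor", "Hardware"), ("data", "Data"), ("database", "Data"), ("sql", "Data"), ("nosql", "Data"), ("analytics", "Data"), ("big data", "Data"), ("hadoop", "Data"), ("spark", "Data"), ("network", "Internet"), ("internet", "Internet"), ("wifi", "Internet"), ("5g", "Internet"), ("cybersecurity", "Security"), ("encryption", "Security"), ("firewall", "Security"), ("security", "Security"), ("iot", "Emerging"), ("vr", "Emerging"), ("ar", "Emerging"), ("virtual reality", "Emerging"), ("augmented reality", "Emerging"), ("metaverse", "Emerging"), ("robotics", "Emerging")] := by rfl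

-- first-match lookup in an assoc list with distinct keys is membership of the pair
theorem pv_lookup_mem (l : List (String × String)) (hl : (l.map Prod.fst).Nodup) (e c : String) :
    ((PySem.Dict.mk l).get? e == some c) = l.contains (e, c) := by
  induction l with
  | nil => simp [PySem.Dict.get?]
  | cons p t ih =>
    obtain ⟨k, v⟩ := p
    simp only [List.map_cons, List.nodup_cons] at hl
    rw [PySem.Dict.get?_mk_cons]
    by_cases hk : k = e
    · subst hk
      have ht : (k, c) ∉ t := fun hm => hl.1 (List.mem_map.2 ⟨(k, c), hm, rfl⟩)
      simp only [List.contains_eq_mem, List.mem_cons, ht, or_false]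
      by_cases hv : v = c
      · simp [hv]
      · simp [hv, Ne.symm hv]
    · simp [hk, ih hl.2, Ne.symm hk]

-- the flat lookup agrees with A's per-category membership test
set_option maxRecDepth 40000 in
theorem pv_key (p : String × List String) (hp : p ∈ pvCategories) (e : String) :
    p.2.contains e = (pvLookup.get? e == some p.1) := by
  fin_cases hp <;>
    (rw [pvLookup_eq, pv_lookup_mem _ (by decide)]; simp)

-- every successful lookup lands on a category name of the table
set_option maxRecDepth 40000 in
theorem pv_lookup_cat (e c : String) (h : pvLookup.get? e = some c) :
    c ∈ pvCatData.map Prod.fst := by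
  rw [pvLookup_eq] at h
  have hm := PySem.Dict.mem_items_of_get?_eq_some _ h
  fin_cases hm <;> decide

-- B's entity loop is the modify-fold over the tagged pairs
theorem pv_loop_tagged (l : List String) (d : PySem.Dict String (List String)) :
    l.foldl (fun d e =>
        match pvLookup.get? e with
        | some c => d.modify c [] (· ++ [e])
        | none => d) d
      = (l.filterMap (fun e => (pvLookup.get? e).map (fun c => (c, e)))).foldl
          (fun d q => d.modify q.1 [] (· ++ [q.2])) d := by
  induction l generalizing d with
  | nil => rfl
  | cons e t ih =>
    cases h : pvLookup.get? e with
    | none => simpa [List.filterMap_cons, h] using ih d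
    | some c => simpa [List.filterMap_cons, h] using ih (d.modify c [] (· ++ [e]))

-- the tagged pass, restricted to pairs tagged with category c, is the filter by c
theorem pv_tagged_filter (l : List String) (c : String) :
    ((l.filterMap (fun e => (pvLookup.get? e).map (fun k => (k, e)))).filter
        (fun q => q.1 == c)).map (·.2)
      = l.filter (fun e => pvLookup.get? e == some c) := by
  induction l with
  | nil => rfl
  | cons e t ih =>
    cases h : pvLookup.get? e with
    | none => simpa [List.filterMap_cons, h] using ih
    | some k =>
      by_cases hk : k = c
      · subst hk; simpa [List.filterMap_cons, h] using ih
      · simp only [List.filterMap_cons, h, Option.map_some, List.filter_cons]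
        have h1 : ((k, e).1 == c) = false := by simpa using hk
        have h2 : (pvLookup.get? e == some c) = false := by simp [h, hk]
        simpa [h1, h2] using ih

-- preallocated buckets: every value is [], so getD defaults to [] everywhere
theorem pv_getD_nil (l : List (String × List String))
    (h : ∀ q ∈ l, q.2 = ([] : List String)) (c : String) :
    (PySem.Dict.mk l).getD c [] = [] := by
  induction l with
  | nil => rfl
  | cons q t ih =>
    obtain ⟨k, v⟩ := q
    rw [PySem.Dict.getD_eq_get?_getD, PySem.Dict.get?_mk_cons]
    by_cases hk : k == c
    · simp only [hk, if_true, Option.getD_some]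
      exact h (k, v) List.mem_cons_self
    · rw [Bool.not_eq_true] at hk
      rw [hk, if_neg (by simp), ← PySem.Dict.getD_eq_get?_getD]
      exact ih (fun q hq => h q (List.mem_cons_of_mem _ hq))

-- B's bucket dict after the entity pass: keys are the table's category names in order,
-- and each bucket holds exactly the entities whose lookup is that category
set_option maxRecDepth 40000 in
theorem pv_buckets_items (entities : List String) :
    (entities.foldl (fun d e =>
        match pvLookup.get? e with
        | some c => d.modify c [] (· ++ [e])
        | none => d)
      (pvCatData.foldl (fun d p => d.insert p.1 []) PySem.Dict.empty)).items
    = pvCategories.map (fun p =>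
        (p.1, entities.filter (fun e => pvLookup.get? e == some p.1))) := by
  set b0 : PySem.Dict String (List String) :=
    pvCatData.foldl (fun d p => d.insert p.1 []) PySem.Dict.empty with hb0
  have hb0mk : b0 = PySem.Dict.mk (pvCatData.map (fun p => (p.1, ([] : List String)))) := by
    rw [hb0]; rfl
  have hb0keys : b0.keys = pvCatData.map Prod.fst := by rw [hb0mk]; rfl
  set tg := entities.filterMap (fun e => (pvLookup.get? e).map (fun c => (c, e))) with htg
  rw [pv_loop_tagged]
  set B := tg.foldl (fun d q => d.modify q.1 [] (· ++ [q.2])) b0 with hB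
  have hkeys : B.keys = b0.keys := by
    rw [hB, PySem.Dict.keys_foldl_modify_key tg Prod.fst [] (fun _ q v => v ++ [q.2]) b0,
        PySem.Set.update_eq_append_filter]
    have hnil : (PySem.Set.ofList (tg.map Prod.fst)).filter
        (fun y => !(PySem.Set.contains b0.keys y)) = [] := by
      rw [List.filter_eq_nil_iff]
      intro c hc
      have hc' : c ∈ tg.map Prod.fst := (PySem.Set.mem_ofList _ _).1 hc
      obtain ⟨q, hq, rfl⟩ := List.mem_map.1 hc'
      obtain ⟨e, he, hqe⟩ := List.mem_filterMap.1 (htg ▸ hq)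
      cases h : pvLookup.get? e with
      | none => rw [h] at hqe; simp at hqe
      | some k =>
        rw [h] at hqe
        simp only [Option.map_some, Option.some.injEq] at hqe
        have hmem : q.1 ∈ pvCatData.map Prod.fst := by
          rw [← hqe]; exact pv_lookup_cat e k h
        have hb : q.1 ∈ b0.keys := by rw [hb0keys]; exact hmem
        simpa using hb
    rw [hnil, List.append_nil]
  have hnodup : B.keys.Nodup := by rw [hkeys, hb0keys]; decide
  have hgetD : ∀ c, B.getD c [] = entities.filter (fun e => pvLookup.get? e == some c) := by
    intro c
    rw [hB, PySem.Dict.getD_foldl_modify_append, htg, pv_tagged_filter]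
    have hb0D : b0.getD c [] = [] := by
      rw [hb0mk]
      exact pv_getD_nil _ (by intro q hq; obtain ⟨p, _, rfl⟩ := List.mem_map.1 hq; rfl) c
    rw [hb0D, List.nil_append]
  rw [PySem.Dict.items_eq_map_keys B hnodup [], hkeys, hb0keys]
  have hk0 : pvCatData.map Prod.fst = pvCategories.map Prod.fst := by decide
  rw [hk0, List.map_map]
  apply List.map_congr_left
  intro p _
  simp only [Function.comp_apply, hgetD p.1]

-- ===== VERDICT (by name: the statement is the Claim_ definition above) =====
set_option maxRecDepth 40000 in
theorem identify_tech_categories_spec : Claim_equal_identify_tech_categories := by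
  intro entities _
  unfold Spec_identify_tech_categories identify_tech_categories identify_tech_categories_alt
  dsimp only
  rw [pv_buckets_items, List.foldl_map]
  congr 1
  apply PySem.List.foldl_congr_mem'
  intro p hp res
  have hf : entities.filter (fun e => p.2.contains e)
      = entities.filter (fun e => pvLookup.get? e == some p.1) :=
    List.filter_congr (fun e _ => pv_key p hp e)
  simp only [hf]
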